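-- pv_equiv track=rewrite | github.com/avielmoshe/Introduction-to-Computer-Science | python/homework8.py | create_snake
-- ===== SOURCE A (Python) =====
-- def create_snake(rows, cols):
--     matrix = [[0 for _ in range(cols)] for _ in range(rows)]
--     current = 1
--     is_up = False
--     for col in range(cols-1,-1,-1):
--         if not is_up:
--             for row in range(rows - 1, -1, -1):
--                 matrix[row][col] = current
--                 current +=1
--         else:
--             for row in range(rows):
--                 matrix[row][col] = current
--                 current +=1
--
--         is_up = not is_up
--     return matrix
-- ===== SOURCE B (Python) =====
-- def create_snake(rows, cols):
--     # closed-form value per cell: column k-th from the right (k = cols-1-col)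
--     # holds base k*rows; even k counts bottom-to-top, odd k top-to-bottom.
--     return [[(cols - 1 - col) * rows
--              + (rows - row if (cols - 1 - col) % 2 == 0 else row + 1)
--              for col in range(cols)]
--             for row in range(rows)]
-- ===== Notes on version B (the rewrite author's own statement) =====
-- stated objective: simpler
-- what changed: Replaces the mutated matrix, counter and direction flag with a single comprehension computing each cell from the closed form k*rows + (rows-row or row+1) where k = cols-1-col.
import Mathlib
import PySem

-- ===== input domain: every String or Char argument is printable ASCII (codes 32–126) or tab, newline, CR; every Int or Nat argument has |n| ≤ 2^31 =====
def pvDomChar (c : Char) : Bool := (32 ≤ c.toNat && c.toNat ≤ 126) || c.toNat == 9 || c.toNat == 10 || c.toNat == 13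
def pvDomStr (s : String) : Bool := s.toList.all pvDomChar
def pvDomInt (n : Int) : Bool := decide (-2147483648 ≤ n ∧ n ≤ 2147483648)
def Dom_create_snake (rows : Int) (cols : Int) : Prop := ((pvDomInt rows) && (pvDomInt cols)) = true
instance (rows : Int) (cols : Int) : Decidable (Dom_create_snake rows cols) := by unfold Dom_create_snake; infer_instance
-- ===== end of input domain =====

-- B replaces A's mutated matrix / counter / direction flag with a per-cell closed form (simpler, same cost).


-- ===== PORT A =====
-- matrix[row][col] = v; exact for the nonnegative in-range indices A's loops produce.
def pvSetCell (m : List (List Int)) (r c : Int) (v : Int) : List (List Int) :=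
  m.set r.toNat ((m.getD r.toNat []).set c.toNat v)

-- one iteration of either inner `for row …` loop body (write cell, bump counter)
def pvInnerStep (c : Int) (p : List (List Int) × Int) (row : Int) : List (List Int) × Int :=
  (pvSetCell p.1 row c p.2, p.2 + 1)

-- one iteration of the outer `for col …` loop body
def pvOuterStep (rows : Int) (s : List (List Int) × Int × Bool) (col : Int) :
    List (List Int) × Int × Bool :=
  if !s.2.2 then
    let p := (PySem.List.pyRange (rows - 1) (-1) (-1)).foldl (pvInnerStep col) (s.1, s.2.1)
    (p.1, p.2, !s.2.2)
  else
    let p := (PySem.List.pyRange 0 rows 1).foldl (pvInnerStep col) (s.1, s.2.1)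
    (p.1, p.2, !s.2.2)

def create_snake (rows : Int) (cols : Int) : List (List Int) :=
  ((PySem.List.pyRange (cols - 1) (-1) (-1)).foldl (pvOuterStep rows)
    ((PySem.List.pyRange 0 rows 1).map
      (fun _ => (PySem.List.pyRange 0 cols 1).map (fun _ => (0 : Int))), 1, false)).1

-- ===== PORT B =====
def create_snake_alt (rows : Int) (cols : Int) : List (List Int) :=
  (PySem.List.pyRange 0 rows 1).map (fun row =>
    (PySem.List.pyRange 0 cols 1).map (fun col =>
      (cols - 1 - col) * rows +
        (if PySem.Int.mod (cols - 1 - col) 2 = 0 then rows - row else row + 1)))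

-- ===== PRECONDITION & SPEC =====
def Spec_create_snake (rows : Int) (cols : Int) (out : List (List Int)) : Prop := out = create_snake_alt rows cols
instance (rows : Int) (cols : Int) (out : List (List Int)) : Decidable (Spec_create_snake rows cols out) := by unfold Spec_create_snake; infer_instance

-- ===== CLAIM (what is proved, stated in full; the proofs are below) =====
def Claim_equal_create_snake : Prop := ∀ (rows : Int) (cols : Int), Dom_create_snake rows cols → Spec_create_snake rows cols (create_snake rows cols)

-- ===== LEMMAS AND PROOFS =====

-- `apply2 f m` rewrites every cell (row r, column x) of m by f.
def apply2 (f : Nat → Nat → Int → Int) (m : List (List Int)) : List (List Int) :=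
  m.mapIdx (fun r row => row.mapIdx (fun x v => f r x v))

theorem apply2_congr {f g : Nat → Nat → Int → Int} (m : List (List Int))
    (h : ∀ r x v, f r x v = g r x v) : apply2 f m = apply2 g m := by
  have : f = g := by funext r x v; exact h r x v
  rw [this]

theorem apply2_id (m : List (List Int)) : apply2 (fun _ _ v => v) m = m := by
  unfold apply2
  apply List.ext_getElem
  · simp
  · intro i h1 h2
    simp only [List.getElem_mapIdx]
    apply List.ext_getElem <;> simp

theorem apply2_eq_id (f : Nat → Nat → Int → Int) (m : List (List Int))
    (h : ∀ r x v, f r x v = v) : apply2 f m = m := by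
  rw [apply2_congr m h, apply2_id]

theorem apply2_apply2 (f g : Nat → Nat → Int → Int) (m : List (List Int)) :
    apply2 f (apply2 g m) = apply2 (fun r x v => f r x (g r x v)) m := by
  unfold apply2
  apply List.ext_getElem
  · simp
  · intro i h1 h2
    simp only [List.getElem_mapIdx]
    apply List.ext_getElem <;> simp

theorem pvSetCell_eq_apply2 (m : List (List Int)) (r c : Int) (v : Int) :
    pvSetCell m r c v = apply2 (fun r' x' v' => if r' = r.toNat ∧ x' = c.toNat then v else v') m := by
  unfold pvSetCell apply2
  apply List.ext_getElem
  · simp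
  · intro i h1 h2
    simp only [List.length_set] at h1
    rw [List.getElem_set]
    simp only [List.getElem_mapIdx]
    by_cases hi : r.toNat = i
    · subst hi
      have hg : m.getD r.toNat [] = m[r.toNat] := List.getD_eq_getElem m [] h1
      rw [if_pos rfl, hg]
      apply List.ext_getElem
      · simp
      · intro j j1 j2
        simp only [List.length_set] at j1
        rw [List.getElem_set]
        simp only [List.getElem_mapIdx]
        split_ifs with hc hd hd
        · rfl
        · exact absurd ⟨trivial, hc.symm⟩ hd
        · exact absurd hd.2.symm hc
        · rfl
    · rw [if_neg hi]
      apply List.ext_getElem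
      · simp
      · intro j j1 j2
        simp only [List.getElem_mapIdx]
        rw [if_neg]
        rintro ⟨ha, _⟩
        exact hi ha.symm

-- the downward inner loop `for row in range(t, -1, -1)`
theorem inner_down (t : Nat) (c cur : Int) (m : List (List Int)) :
    (PySem.List.pyRange (t : Int) (-1) (-1)).foldl (pvInnerStep c) (m, cur) =
      (apply2 (fun r x v => if x = c.toNat ∧ r ≤ t then cur + ((t : Int) - r) else v) m,
       cur + t + 1) := by
  induction t generalizing cur m with
  | zero =>
      rw [PySem.List.pyRange_neg_one_cons (by norm_num), PySem.List.pyRange_neg_one_eq_nil (by norm_num)]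
      simp only [List.foldl_cons, List.foldl_nil, pvInnerStep]
      rw [pvSetCell_eq_apply2]
      refine Prod.ext ?_ (by norm_num)
      apply apply2_congr
      intro r x v
      split_ifs with h1 h2 h2 <;> simp_all <;> omega
  | succ t ih =>
      have hcons : PySem.List.pyRange ((t + 1 : Nat) : Int) (-1) (-1) =
          ((t + 1 : Nat) : Int) :: PySem.List.pyRange ((t : Nat) : Int) (-1) (-1) := by
        have := PySem.List.pyRange_neg_one_cons (a := ((t + 1 : Nat) : Int)) (b := (-1)) (by push_cast; omega)
        rw [this]
        norm_num
      rw [hcons]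
      simp only [List.foldl_cons, pvInnerStep]
      rw [ih, pvSetCell_eq_apply2, apply2_apply2]
      refine Prod.ext ?_ (by push_cast; ring_nf)
      apply apply2_congr
      intro r x v
      split_ifs with h1 h2 h2 h3 <;> first
        | rfl
        | (exfalso; omega)
        | (push_cast at *; omega)
        | simp_all

-- the upward inner loop, as `range(a, a+n)` for the induction
theorem inner_up (n : Nat) (a : Int) (ha : 0 ≤ a) (c cur : Int) (m : List (List Int)) :
    (PySem.List.pyRange a (a + n) 1).foldl (pvInnerStep c) (m, cur) =
      (apply2 (fun r x v => if x = c.toNat ∧ a ≤ (r : Int) ∧ (r : Int) < a + n then cur + (r - a) else v) m,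
       cur + n) := by
  induction n generalizing a cur m with
  | zero =>
      rw [PySem.List.pyRange_one_eq_nil (by omega)]
      simp only [List.foldl_nil]
      refine Prod.ext ?_ (by norm_num)
      dsimp only
      refine ((apply2_eq_id _ m ?_).symm)
      intro r x v
      rw [if_neg]
      rintro ⟨-, h1, h2⟩
      push_cast at h2
      omega
  | succ n ih =>
      rw [PySem.List.pyRange_one_cons (by push_cast; omega)]
      simp only [List.foldl_cons, pvInnerStep]
      have hsplit : a + ((n : Nat) + 1 : Nat) = (a + 1) + (n : Nat) := by push_cast; ring
      rw [hsplit, ih (a + 1) (by omega), pvSetCell_eq_apply2, apply2_apply2]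
      refine Prod.ext ?_ (by push_cast; ring_nf)
      apply apply2_congr
      intro r x v
      split_ifs with h1 h2 h2 h3 <;> first
        | rfl
        | (exfalso; omega)
        | (push_cast at *; omega)
        | simp_all

-- per-cell value written in a column processed with direction flag b, counter cur at its start
def snakeVal (rows cur : Int) (b : Bool) (r : Nat) : Int :=
  cur + (if b then (r : Int) else rows - 1 - r)

-- one outer iteration on column c (0 ≤ c), matrix rows > 0
theorem outer_one (rows : Int) (hrows : 0 < rows) (c cur : Int) (hc : 0 ≤ c)
    (up : Bool) (m : List (List Int)) :
    pvOuterStep rows (m, cur, up) c =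
      (apply2 (fun r x v => if x = c.toNat ∧ r < rows.toNat then snakeVal rows cur up r else v) m,
       cur + rows, !up) := by
  cases up with
  | false =>
      simp only [pvOuterStep, Bool.not_false]
      rw [if_pos trivial]
      have h1 : rows - 1 = ((rows.toNat - 1 : Nat) : Int) := by omega
      rw [h1, inner_down]
      refine Prod.ext ?_ (by refine Prod.ext (by dsimp only; push_cast; omega) rfl)
      apply apply2_congr
      intro r x v
      unfold snakeVal
      split_ifs with h2 h3 h3 <;> first
        | rfl
        | (exfalso; omega)
        | (push_cast at *; omega)
        | simp_all
  | true =>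
      simp only [pvOuterStep, Bool.not_true]
      rw [if_neg (by simp)]
      have h1 : PySem.List.pyRange 0 rows 1 = PySem.List.pyRange 0 ((0 : Int) + rows.toNat) 1 := by
        have : (0 : Int) + (rows.toNat : Int) = rows := by omega
        rw [this]
      rw [h1, inner_up rows.toNat 0 le_rfl]
      refine Prod.ext ?_ (by refine Prod.ext (by dsimp only; push_cast; omega) rfl)
      apply apply2_congr
      intro r x v
      unfold snakeVal
      split_ifs with h2 h3 h3 <;> first
        | rfl
        | (exfalso; omega)
        | (push_cast at *; omega)
        | simp_all

theorem parity_flip (k : Nat) : ((k + 1) % 2 == 1) = !(k % 2 == 1) := by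
  rcases Nat.even_or_odd k with h | h
  · have hk : k % 2 = 0 := Nat.even_iff.mp h
    simp [Nat.add_mod, hk]
  · have hk : k % 2 = 1 := Nat.odd_iff.mp h
    simp [Nat.add_mod, hk]

-- the whole outer loop over columns nc-1 … 0, matrix rows > 0
theorem outer_loop (rows : Int) (hrows : 0 < rows) (nc : Nat) (cur : Int) (up : Bool)
    (m : List (List Int)) :
    (PySem.List.pyRange ((nc : Int) - 1) (-1) (-1)).foldl (pvOuterStep rows) (m, cur, up) =
      (apply2 (fun r x v =>
          if x < nc ∧ r < rows.toNat then
            cur + ((nc - 1 - x : Nat) : Int) * rows +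
              (if up ^^ ((nc - 1 - x) % 2 == 1) then (r : Int) else rows - 1 - r)
          else v) m,
       cur + nc * rows, up ^^ (nc % 2 == 1)) := by
  induction nc generalizing cur up m with
  | zero =>
      rw [PySem.List.pyRange_neg_one_eq_nil (by norm_num)]
      simp only [List.foldl_nil]
      refine Prod.ext ?_ (by refine Prod.ext (by dsimp only; push_cast; ring_nf) (by simp))
      dsimp only
      refine ((apply2_eq_id _ m ?_).symm)
      intro r x v
      rw [if_neg]
      rintro ⟨h, -⟩
      omega
  | succ nc ih =>
      have hcons : PySem.List.pyRange (((nc + 1 : Nat) : Int) - 1) (-1) (-1) =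
          ((nc : Nat) : Int) :: PySem.List.pyRange ((nc : Int) - 1) (-1) (-1) := by
        have h2 : (((nc + 1 : Nat) : Int) - 1) = ((nc : Nat) : Int) := by push_cast; ring
        rw [h2, PySem.List.pyRange_neg_one_cons (by push_cast; omega)]
      rw [hcons]
      simp only [List.foldl_cons]
      rw [outer_one rows hrows _ cur (by positivity) up m, ih, apply2_apply2]
      refine Prod.ext ?_ ?_
      · dsimp only
        apply apply2_congr
        intro r x v
        simp only [Int.toNat_natCast]
        by_cases hruns : r < rows.toNat
        · by_cases hx : x < nc
          · have h1 : x < nc ∧ r < rows.toNat := ⟨hx, hruns⟩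
            have h2 : x < nc + 1 ∧ r < rows.toNat := ⟨by omega, hruns⟩
            rw [if_pos h1, if_pos h2]
            have hd : nc - 1 - x + 1 = nc + 1 - 1 - x := by omega
            rw [← hd, parity_flip (nc - 1 - x)]
            have hcast : ((nc - 1 - x + 1 : Nat) : Int) = ((nc - 1 - x : Nat) : Int) + 1 := by omega
            rw [hcast]
            cases up <;> cases hb : ((nc - 1 - x) % 2 == 1) <;>
              simp only [hb, Bool.false_xor, Bool.true_xor, Bool.not_false, Bool.not_true,
                Bool.xor_false, Bool.xor_true, if_true, if_false] <;> (push_cast; ring)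
          · by_cases hx2 : x = nc
            · subst hx2
              have h1 : ¬ (x < x ∧ r < rows.toNat) := by omega
              have h2 : x = x ∧ r < rows.toNat := ⟨rfl, hruns⟩
              have h3 : x < x + 1 ∧ r < rows.toNat := ⟨by omega, hruns⟩
              rw [if_neg h1, if_pos h2, if_pos h3]
              unfold snakeVal
              have hd : x + 1 - 1 - x = 0 := by omega
              rw [hd]
              cases up <;> simp
            · rw [if_neg (by omega), if_neg (by rintro ⟨h, -⟩; omega),
                if_neg (by rintro ⟨h, -⟩; omega)]
        · rw [if_neg (by tauto), if_neg (by tauto), if_neg (by tauto)]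
      · refine Prod.ext ?_ ?_
        · dsimp only
          push_cast; ring
        · dsimp only
          rw [parity_flip nc]
          cases up <;> simp

-- if rows ≤ 0 both inner ranges are empty: the outer fold never touches the matrix
theorem outer_loop_rows_nonpos (rows : Int) (hrows : rows ≤ 0) (l : List Int)
    (s : List (List Int) × Int × Bool) :
    (l.foldl (pvOuterStep rows) s).1 = s.1 := by
  induction l generalizing s with
  | nil => rfl
  | cons c l ih =>
      rw [List.foldl_cons, ih]
      unfold pvOuterStep
      rw [PySem.List.pyRange_neg_one_eq_nil (by omega), PySem.List.pyRange_one_eq_nil (by omega)]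
      split <;> rfl

theorem create_snake_spec : Claim_equal_create_snake := by
  intro rows cols _
  unfold Spec_create_snake create_snake create_snake_alt
  by_cases hr : rows ≤ 0
  · rw [outer_loop_rows_nonpos rows hr,
      PySem.List.pyRange_one_eq_nil (a := 0) (b := rows) (by omega)]
    simp
  · push_neg at hr
    by_cases hc : cols ≤ 0
    · rw [PySem.List.pyRange_neg_one_eq_nil (by omega),
        PySem.List.pyRange_one_eq_nil (a := 0) (b := cols) (by omega)]
      simp
    · push_neg at hc
      have hcols : cols - 1 = ((cols.toNat : Int)) - 1 := by omega
      rw [hcols, outer_loop rows hr cols.toNat 1 false]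
      dsimp only
      apply List.ext_getElem
      · simp [apply2]
      · intro r hr1 hr2
        simp only [apply2, List.getElem_mapIdx, List.getElem_map]
        have hrR : r < rows.toNat := by
          simpa [PySem.List.length_pyRange_one] using hr2
        apply List.ext_getElem
        · simp [PySem.List.length_pyRange_one]
        · intro x hx1 hx2
          simp only [List.getElem_mapIdx, List.getElem_map, PySem.List.getElem_pyRange_one]
          have hxC : x < cols.toNat := by
            simpa [PySem.List.length_pyRange_one] using hx2
          rw [if_pos ⟨hxC, hrR⟩]
          have hdc : ((cols.toNat : Int)) - 1 - (0 + (x : Int)) = ((cols.toNat - 1 - x : Nat) : Int) := by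
            push_cast; omega
          rw [hdc, PySem.Int.mod_eq_emod_of_pos (by norm_num)]
          by_cases hp : (cols.toNat - 1 - x) % 2 = 0
          · have h1 : ((cols.toNat - 1 - x) % 2 == 1) = false := by simp [hp]
            have h2 : ((cols.toNat - 1 - x : Nat) : Int) % 2 = 0 := by omega
            rw [h1, h2]
            simp only [Bool.false_xor, Bool.false_eq_true, if_false, if_pos rfl]
            push_cast; ring
          · have h1 : ((cols.toNat - 1 - x) % 2 == 1) = true := by
              have : (cols.toNat - 1 - x) % 2 = 1 := by omega
              simp [this]
            have h2 : ¬ (((cols.toNat - 1 - x : Nat) : Int) % 2 = 0) := by omega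
            rw [h1, if_neg h2]
            simp only [Bool.false_xor, if_true]
            push_cast; ring
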